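-- pv_equiv track=rewrite | github.com/LovieCode/astrbot_plugin_style_learner | jargon_miner.py | should_infer
-- ===== SOURCE A (Python) =====
-- INFERENCE_THRESHOLDS = [2, 4, 8, 12, 24, 60, 100]
--
-- def should_infer(jargon: dict) -> bool:
--     if jargon.get("is_complete", False):
--         return False
--     count = jargon.get("count", 0) or 0
--     last = jargon.get("last_inference_count", 0) or 0
--     if count <= last:
--         return False
--     for t in INFERENCE_THRESHOLDS:
--         if count >= t > last:
--             return True
--     return False
-- ===== SOURCE B (Python) =====
-- INFERENCE_THRESHOLDS = [2, 4, 8, 12, 24, 60, 100]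
--
--
-- def _rank(x):
--     """Number of thresholds <= x, found by binary search (bisect_right)."""
--     lo, hi = 0, len(INFERENCE_THRESHOLDS)
--     while lo < hi:
--         mid = (lo + hi) // 2
--         if x < INFERENCE_THRESHOLDS[mid]:
--             hi = mid
--         else:
--             lo = mid + 1
--     return lo
--
--
-- def should_infer(jargon: dict) -> bool:
--     if jargon.get("is_complete", False):
--         return False
--     count = jargon.get("count", 0) or 0
--     last = jargon.get("last_inference_count", 0) or 0
--     return count > last and _rank(count) > _rank(last)
-- ===== Notes on version B (the rewrite author's own statement) =====
-- stated objective: alternative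
-- what changed: The linear scan over INFERENCE_THRESHOLDS is replaced by a binary search (bisect_right rank): some threshold lies in (last, count] iff rank(count) > rank(last).
import Mathlib
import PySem

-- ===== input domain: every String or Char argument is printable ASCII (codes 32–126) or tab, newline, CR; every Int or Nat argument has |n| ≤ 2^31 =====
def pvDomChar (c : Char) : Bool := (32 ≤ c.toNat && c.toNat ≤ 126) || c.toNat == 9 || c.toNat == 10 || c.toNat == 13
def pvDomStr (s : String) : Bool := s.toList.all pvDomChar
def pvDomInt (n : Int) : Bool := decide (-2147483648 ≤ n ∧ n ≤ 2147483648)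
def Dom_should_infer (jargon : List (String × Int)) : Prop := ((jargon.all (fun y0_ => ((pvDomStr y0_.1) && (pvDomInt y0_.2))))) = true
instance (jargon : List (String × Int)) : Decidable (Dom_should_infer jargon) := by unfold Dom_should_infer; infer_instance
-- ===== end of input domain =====

-- B replaces A's linear scan of the threshold list by a binary-search rank comparison (alternative algorithm).

-- ===== PORT A =====
def pvThresholds : List Int := [2, 4, 8, 12, 24, 60, 100]

def should_infer (jargon : List (String × Int)) : Bool :=
  if PySem.Dict.getD (PySem.Dict.ofList jargon) "is_complete" 0 ≠ 0 then false
  else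
    let c := PySem.Dict.getD (PySem.Dict.ofList jargon) "count" 0
    let count := if c ≠ 0 then c else 0        -- `or 0` coercion
    let l := PySem.Dict.getD (PySem.Dict.ofList jargon) "last_inference_count" 0
    let last := if l ≠ 0 then l else 0         -- `or 0` coercion
    if count ≤ last then false
    else pvThresholds.any (fun t => decide (count ≥ t) && decide (t > last))

-- ===== PORT B =====
-- _rank: binary search (bisect_right) over the fixed threshold list
def pvRank (x : Int) (lo hi : Nat) : Nat :=
  if lo < hi then
    let mid := (lo + hi) / 2
    if x < pvThresholds.getD mid 0 then pvRank x lo mid else pvRank x (mid + 1) hi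
  else lo
termination_by hi - lo

def should_infer_alt (jargon : List (String × Int)) : Bool :=
  if PySem.Dict.getD (PySem.Dict.ofList jargon) "is_complete" 0 ≠ 0 then false
  else
    let c := PySem.Dict.getD (PySem.Dict.ofList jargon) "count" 0
    let count := if c ≠ 0 then c else 0        -- `or 0` coercion
    let l := PySem.Dict.getD (PySem.Dict.ofList jargon) "last_inference_count" 0
    let last := if l ≠ 0 then l else 0         -- `or 0` coercion
    decide (count > last) && decide (pvRank count 0 pvThresholds.length > pvRank last 0 pvThresholds.length)

-- ===== PRECONDITION & SPEC =====
def Spec_should_infer (jargon : List (String × Int)) (out : Bool) : Prop := out = should_infer_alt jargon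
instance (jargon : List (String × Int)) (out : Bool) : Decidable (Spec_should_infer jargon out) := by unfold Spec_should_infer; infer_instance

-- ===== CLAIM (what is proved, stated in full; the proofs are below) =====
def Claim_equal_should_infer : Prop := ∀ (jargon : List (String × Int)), Dom_should_infer jargon → Spec_should_infer jargon (should_infer jargon)

-- ===== LEMMAS AND PROOFS =====

-- the binary-search rank, evaluated on the fixed 7-element threshold list
lemma pvRank_leaf (x : Int) (i : Nat) : pvRank x i i = i := by
  rw [pvRank.eq_def]; simp

lemma pvRank_01 (x : Int) : pvRank x 0 1 = if x < 2 then 0 else 1 := by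
  rw [pvRank.eq_def]; norm_num [pvThresholds, pvRank_leaf]

lemma pvRank_23 (x : Int) : pvRank x 2 3 = if x < 8 then 2 else 3 := by
  rw [pvRank.eq_def]; norm_num [pvThresholds, pvRank_leaf]

lemma pvRank_45 (x : Int) : pvRank x 4 5 = if x < 24 then 4 else 5 := by
  rw [pvRank.eq_def]; norm_num [pvThresholds, pvRank_leaf]

lemma pvRank_67 (x : Int) : pvRank x 6 7 = if x < 100 then 6 else 7 := by
  rw [pvRank.eq_def]; norm_num [pvThresholds, pvRank_leaf]

lemma pvRank_03 (x : Int) :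
    pvRank x 0 3 = if x < 4 then (if x < 2 then 0 else 1) else (if x < 8 then 2 else 3) := by
  rw [pvRank.eq_def]; norm_num [pvThresholds, pvRank_01, pvRank_23]

lemma pvRank_47 (x : Int) :
    pvRank x 4 7 = if x < 60 then (if x < 24 then 4 else 5) else (if x < 100 then 6 else 7) := by
  rw [pvRank.eq_def]; norm_num [pvThresholds, pvRank_45, pvRank_67]

lemma pvRank_closed (x : Int) :
    pvRank x 0 7 = (if x < 2 then 0 else if x < 4 then 1 else if x < 8 then 2
      else if x < 12 then 3 else if x < 24 then 4 else if x < 60 then 5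
      else if x < 100 then 6 else 7) := by
  rw [pvRank.eq_def]; norm_num [pvThresholds, pvRank_03, pvRank_47]
  split_ifs <;> omega

set_option maxHeartbeats 1000000 in
-- the core arithmetic fact: a threshold lies in (l, c] iff rank c > rank l
lemma key (c l : Int) :
    (if c ≤ l then false
     else pvThresholds.any (fun t => decide (c ≥ t) && decide (t > l)))
    = (decide (c > l) && decide (pvRank c 0 pvThresholds.length > pvRank l 0 pvThresholds.length)) := by
  have hlen : pvThresholds.length = 7 := by decide
  rw [hlen, pvRank_closed c, pvRank_closed l]
  simp only [pvThresholds, List.any_cons, List.any_nil]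
  by_cases h : c ≤ l
  · have hc : decide (c > l) = false := by simp; omega
    rw [if_pos h, hc, Bool.false_and]
  · have hc : decide (c > l) = true := by simp; omega
    simp only [if_neg h, hc, Bool.true_and]
    split_ifs <;> simp <;> omega

-- a ≠ 0 guard followed by `else 0` is the identity
lemma orZero (c : Int) : (if c ≠ 0 then c else 0) = c := by split_ifs <;> omega

-- ===== VERDICT (by name: the statement is the Claim_ definition above) =====
theorem should_infer_spec : Claim_equal_should_infer := by
  intro jargon _
  unfold Spec_should_infer should_infer should_infer_alt
  by_cases h : PySem.Dict.getD (PySem.Dict.ofList jargon) "is_complete" 0 ≠ 0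
  · simp [h]
  · simp only [if_neg h, orZero]
    exact key _ _
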